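-- pv_equiv track=rewrite | github.com/Goatman13/spu2c | spu2c.py | fsmbi
-- ===== SOURCE A (Python) =====
-- def get_reg(reg):
--
-- 	if reg == 0:
-- 		return "lr"
-- 	elif reg == 1:
-- 		return "sp"
-- 	else:
-- 		return "r{:d}".format(reg)
--
-- def fsmbi(opcode):
--
-- 	rt      = get_reg(opcode & 0x7F)
-- 	i44     = (opcode >> 7)  & 0xF
-- 	i43     = (opcode >> 11) & 0xF
-- 	i42     = (opcode >> 15) & 0xF
-- 	i41     = (opcode >> 19) & 0xF
-- 	mask_44 = 0
-- 	mask_43 = 0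
-- 	mask_42 = 0
-- 	mask_41 = 0
-- 	i = 0
-- 	while i < 4:
-- 		mask_temp = i44 & (1<<i)
-- 		if mask_temp != 0:
-- 			mask_44 = mask_44 | (0xFF << (i*8))
-- 		i += 1
-- 	i = 0
-- 	while i < 4:
-- 		mask_temp = i43 & (1<<i)
-- 		if mask_temp != 0:
-- 			mask_43 = mask_43 | (0xFF << (i*8))
-- 		i += 1
-- 	i = 0
-- 	while i < 4:
-- 		mask_temp = i42 & (1<<i)
-- 		if mask_temp != 0:
-- 			mask_42 = mask_42 | (0xFF << (i*8))
-- 		i += 1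
-- 	i = 0
-- 	while i < 4:
-- 		mask_temp = i41 & (1<<i)
-- 		if mask_temp != 0:
-- 			mask_41 = mask_41 | (0xFF << (i*8))
-- 		i += 1
-- 	return rt + "[128b] = 0x{:08X}:{:08X}:{:08X}:{:08X}".format(mask_41,mask_42,mask_43,mask_44)
-- ===== SOURCE B (Python) =====
-- def get_reg(reg):
--
-- 	if reg == 0:
-- 		return "lr"
-- 	elif reg == 1:
-- 		return "sp"
-- 	else:
-- 		return "r{:d}".format(reg)
--
-- def _nibble_mask(n):
-- 	# spread the 4 bits of n to bits 0,8,16,24, then widen each to a full byte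
-- 	return ((n * 0x00204081) & 0x01010101) * 0xFF
--
-- def fsmbi(opcode):
-- 	rt  = get_reg(opcode & 0x7F)
-- 	i44 = (opcode >> 7)  & 0xF
-- 	i43 = (opcode >> 11) & 0xF
-- 	i42 = (opcode >> 15) & 0xF
-- 	i41 = (opcode >> 19) & 0xF
-- 	return rt + "[128b] = 0x{:08X}:{:08X}:{:08X}:{:08X}".format(
-- 		_nibble_mask(i41), _nibble_mask(i42), _nibble_mask(i43), _nibble_mask(i44))
-- ===== Notes on version B (the rewrite author's own statement) =====
-- stated objective: simpler
-- what changed: Each of A's four 4-iteration bit-loops is replaced by one closed-form bit trick: the nibble's bits are spread to byte positions by multiplying with 0x00204081 and masking with 0x01010101, then widened to full bytes by multiplying with 0xFF; no loops remain.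
import Mathlib
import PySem

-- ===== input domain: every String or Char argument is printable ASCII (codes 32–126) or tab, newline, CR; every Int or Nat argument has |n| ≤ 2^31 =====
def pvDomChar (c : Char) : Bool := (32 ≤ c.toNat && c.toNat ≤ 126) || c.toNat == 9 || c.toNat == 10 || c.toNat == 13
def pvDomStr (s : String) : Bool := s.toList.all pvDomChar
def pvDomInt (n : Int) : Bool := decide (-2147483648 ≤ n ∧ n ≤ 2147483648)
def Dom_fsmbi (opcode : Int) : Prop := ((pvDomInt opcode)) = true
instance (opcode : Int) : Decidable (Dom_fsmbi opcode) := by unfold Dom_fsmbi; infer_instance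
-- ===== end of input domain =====

-- B replaces A's four bit-loops by a closed-form multiply-and-mask expansion of each
-- nibble into its 32-bit byte mask (objective: simpler — no loops).

-- shared helper: Python's get_reg (identical in Source A and Source B)
def getReg (reg : Int) : String :=
  if reg = 0 then "lr"
  else if reg = 1 then "sp"
  else "r" ++ PySem.Int.toStr reg

-- shared helper: Python's "{:08X}".format(m) — exact for 0 ≤ m < 2^32 (every mask
-- value both programs format lies in that range)
def hexChar (n : Nat) : Char :=
  if n < 10 then Char.ofNat (48 + n) else Char.ofNat (55 + n)

def hex8 (m : Int) : String :=
  String.ofList ((List.range 8).map fun i => hexChar ((m.toNat >>> ((7 - i) * 4)) &&& 15))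

-- ===== PORT A =====
-- A's 'i = 0; while i < 4: …' loop, as structural recursion on the remaining
-- iteration count 'rem' (the loop variable is i = 4 - rem); called with rem = 4
def maskLoop (nib mask : Int) : Nat → Int
  | 0 => mask
  | rem + 1 =>
    let i := 4 - (rem + 1)
    maskLoop nib
      (if PySem.Int.band nib ((1 : Int) <<< i) ≠ 0 then
        PySem.Int.bor mask ((0xFF : Int) <<< (i * 8))
      else mask) rem

def fsmbi (opcode : Int) : String :=
  let rt := getReg (PySem.Int.band opcode 0x7F)
  let i44 := PySem.Int.band (opcode >>> 7) 0xF
  let i43 := PySem.Int.band (opcode >>> 11) 0xF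
  let i42 := PySem.Int.band (opcode >>> 15) 0xF
  let i41 := PySem.Int.band (opcode >>> 19) 0xF
  let mask44 := maskLoop i44 0 4
  let mask43 := maskLoop i43 0 4
  let mask42 := maskLoop i42 0 4
  let mask41 := maskLoop i41 0 4
  rt ++ "[128b] = 0x" ++ hex8 mask41 ++ ":" ++ hex8 mask42 ++ ":" ++ hex8 mask43 ++ ":" ++ hex8 mask44

-- ===== PORT B =====
def nibbleMask (n : Int) : Int :=
  PySem.Int.band (n * 0x00204081) 0x01010101 * 0xFF

def fsmbi_alt (opcode : Int) : String :=
  let rt := getReg (PySem.Int.band opcode 0x7F)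
  let i44 := PySem.Int.band (opcode >>> 7) 0xF
  let i43 := PySem.Int.band (opcode >>> 11) 0xF
  let i42 := PySem.Int.band (opcode >>> 15) 0xF
  let i41 := PySem.Int.band (opcode >>> 19) 0xF
  rt ++ "[128b] = 0x" ++ hex8 (nibbleMask i41) ++ ":" ++ hex8 (nibbleMask i42) ++ ":" ++
    hex8 (nibbleMask i43) ++ ":" ++ hex8 (nibbleMask i44)

-- ===== PRECONDITION & SPEC =====
def Spec_fsmbi (opcode : Int) (out : String) : Prop := out = fsmbi_alt opcode
instance (opcode : Int) (out : String) : Decidable (Spec_fsmbi opcode out) := by unfold Spec_fsmbi; infer_instance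

-- ===== CLAIM (what is proved, stated in full; the proofs are below) =====
def Claim_equal_fsmbi : Prop := ∀ (opcode : Int), Dom_fsmbi opcode → Spec_fsmbi opcode (fsmbi opcode)

-- ===== LEMMAS AND PROOFS =====
lemma band15_bounds (x : Int) : 0 ≤ PySem.Int.band x 15 ∧ PySem.Int.band x 15 < 16 := by
  unfold PySem.Int.band
  split_ifs with h1 h2 h2
  · have : x.toNat &&& (15 : Int).toNat ≤ (15 : Int).toNat := Nat.and_le_right
    omega
  · omega
  · have : (15 : Int).toNat - ((15 : Int).toNat &&& (-x - 1).toNat) ≤ (15 : Int).toNat :=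
      Nat.sub_le _ _
    omega
  · omega

lemma mask_eq_of_lt16 (n : Int) (h0 : 0 ≤ n) (h16 : n < 16) :
    maskLoop n 0 4 = nibbleMask n := by
  interval_cases n <;> decide

lemma mask_eq (x : Int) :
    maskLoop (PySem.Int.band x 15) 0 4 = nibbleMask (PySem.Int.band x 15) := by
  exact mask_eq_of_lt16 _ (band15_bounds x).1 (band15_bounds x).2

-- ===== VERDICT (by name: the statement is the Claim_ definition above) =====
theorem fsmbi_spec : Claim_equal_fsmbi := by
  intro opcode _
  show fsmbi opcode = fsmbi_alt opcode
  unfold fsmbi fsmbi_alt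
  simp only [mask_eq]
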